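-- pv_equiv track=rewrite | github.com/alex287423475/super-translator-team-pro | scripts/splitter.py | merge_sections
-- ===== SOURCE A (Python) =====
-- from typing import List
--
-- def merge_sections(sections: List[str], chunk_size: int) -> List[str]:
--     chunks: List[str] = []
--     current: List[str] = []
--     current_len = 0
--
--     for section in sections:
--         projected = current_len + len(section) + (2 if current else 0)
--         if current and projected > chunk_size:
--             chunks.append("\n\n".join(current))
--             current = []
--             current_len = 0
--
--         if len(section) > chunk_size:
--             paragraphs = [p for p in section.split("\n\n") if p.strip()]
--             for paragraph in paragraphs:
--                 projected = current_len + len(paragraph) + (2 if current else 0)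
--                 if current and projected > chunk_size:
--                     chunks.append("\n\n".join(current))
--                     current = []
--                     current_len = 0
--
--                 if len(paragraph) > chunk_size:
--                     if current:
--                         chunks.append("\n\n".join(current))
--                         current = []
--                         current_len = 0
--                     for start in range(0, len(paragraph), chunk_size):
--                         chunks.append(paragraph[start : start + chunk_size])
--                 else:
--                     current.append(paragraph)
--                     current_len += len(paragraph) + (2 if current_len else 0)
--             continue
--
--         current.append(section)
--         current_len += len(section) + (2 if current_len else 0)
--
--     if current:
--         chunks.append("\n\n".join(current))
--
--     return chunks or [""]
-- ===== SOURCE B (Python) =====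
-- from typing import List
--
-- def _tokens(sections, chunk_size):
--     # flat token stream: ("merge", text) | ("flush", "") | ("hard", slice)
--     for section in sections:
--         if len(section) <= chunk_size:
--             yield ("merge", section)
--             continue
--         yield ("flush", "")
--         for paragraph in section.split("\n\n"):
--             if not paragraph.strip():
--                 continue
--             if len(paragraph) <= chunk_size:
--                 yield ("merge", paragraph)
--             else:
--                 yield ("flush", "")
--                 for start in range(0, len(paragraph), chunk_size):
--                     yield ("hard", paragraph[start:start + chunk_size])
--
-- def merge_sections(sections: List[str], chunk_size: int) -> List[str]:
--     chunks: List[str] = []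
--     current: List[str] = []
--     current_len = 0
--     for kind, text in _tokens(sections, chunk_size):
--         if kind == "hard":
--             chunks.append(text)
--         elif kind == "flush":
--             if current:
--                 chunks.append("\n\n".join(current))
--                 current = []
--                 current_len = 0
--         else:
--             if current and current_len + len(text) + 2 > chunk_size:
--                 chunks.append("\n\n".join(current))
--                 current = []
--                 current_len = 0
--             current.append(text)
--             current_len += len(text) + (2 if current_len else 0)
--     if current:
--         chunks.append("\n\n".join(current))
--     return chunks or [""]
-- ===== Notes on version B (the rewrite author's own statement) =====
-- stated objective: alternative
-- what changed: A's nested section/paragraph loops with inline flush logic are replaced by a flat generator of merge/flush/hard tokens consumed by a single greedy packing loop; the forced pre-flush before oversize sections/paragraphs becomes an explicit flush token.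
import Mathlib
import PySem

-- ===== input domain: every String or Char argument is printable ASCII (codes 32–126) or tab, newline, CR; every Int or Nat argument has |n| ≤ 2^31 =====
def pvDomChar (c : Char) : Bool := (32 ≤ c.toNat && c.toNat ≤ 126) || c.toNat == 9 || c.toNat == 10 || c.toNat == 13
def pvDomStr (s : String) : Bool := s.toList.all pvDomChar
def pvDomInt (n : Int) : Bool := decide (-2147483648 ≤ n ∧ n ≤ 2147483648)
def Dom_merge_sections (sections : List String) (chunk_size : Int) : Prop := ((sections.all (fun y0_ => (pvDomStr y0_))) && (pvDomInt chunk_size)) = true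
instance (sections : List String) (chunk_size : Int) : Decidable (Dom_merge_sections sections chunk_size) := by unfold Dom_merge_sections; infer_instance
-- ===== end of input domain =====

-- B replaces A's nested section/paragraph loops by a flat token stream (merge/flush/hard)
-- consumed by one greedy packing loop — same return value, a different decomposition (objective: alternative).

-- ===== PORT A =====
-- state = (chunks, current, current_len), exactly the three Python variables

-- the body of A's inner `for paragraph in paragraphs:` loop
def mergeParA (cs : Int) (st : List String × List String × Int) (p : String) :
    List String × List String × Int :=
  let st₁ := if st.2.1 ≠ [] ∧ st.2.2 + PySem.Str.len p + (if st.2.1 ≠ [] then 2 else 0) > cs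
             then (st.1 ++ [PySem.Str.join "\n\n" st.2.1], ([] : List String), (0 : Int)) else st
  if PySem.Str.len p > cs then
    let st₂ := if st₁.2.1 ≠ [] then (st₁.1 ++ [PySem.Str.join "\n\n" st₁.2.1], ([] : List String), (0 : Int)) else st₁
    ((PySem.List.pyRange 0 (PySem.Str.len p) cs).foldl
        (fun ch start => ch ++ [PySem.Str.slice p (some start) (some (start + cs))]) st₂.1,
     st₂.2.1, st₂.2.2)
  else (st₁.1, st₁.2.1 ++ [p], st₁.2.2 + PySem.Str.len p + (if st₁.2.2 ≠ 0 then 2 else 0))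

-- the body of A's outer `for section in sections:` loop
def mergeSecA (cs : Int) (st : List String × List String × Int) (s : String) :
    List String × List String × Int :=
  let st₁ := if st.2.1 ≠ [] ∧ st.2.2 + PySem.Str.len s + (if st.2.1 ≠ [] then 2 else 0) > cs
             then (st.1 ++ [PySem.Str.join "\n\n" st.2.1], ([] : List String), (0 : Int)) else st
  if PySem.Str.len s > cs then
    (((PySem.Str.split? s "\n\n").getD []).filter (fun p => PySem.Str.strip p ≠ "")).foldl (mergeParA cs) st₁
  else (st₁.1, st₁.2.1 ++ [s], st₁.2.2 + PySem.Str.len s + (if st₁.2.2 ≠ 0 then 2 else 0))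

def merge_sections (sections : List String) (chunk_size : Int) : List String :=
  let st := sections.foldl (mergeSecA chunk_size) ([], [], 0)
  let chunks := if st.2.1 ≠ [] then st.1 ++ [PySem.Str.join "\n\n" st.2.1] else st.1
  if chunks = [] then [""] else chunks

-- ===== PORT B =====
inductive PvTok where
  | merge : String → PvTok
  | flush : PvTok
  | hard : String → PvTok
deriving DecidableEq, Repr

-- tokens of one paragraph of an oversize section (B's inner generator loop)
def tokParB (cs : Int) (p : String) : List PvTok :=
  if PySem.Str.strip p = "" then []
  else if PySem.Str.len p ≤ cs then [PvTok.merge p]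
  else PvTok.flush ::
    (PySem.List.pyRange 0 (PySem.Str.len p) cs).map
      (fun start => PvTok.hard (PySem.Str.slice p (some start) (some (start + cs))))

-- tokens of one section (B's generator body)
def tokSecB (cs : Int) (s : String) : List PvTok :=
  if PySem.Str.len s ≤ cs then [PvTok.merge s]
  else PvTok.flush :: ((PySem.Str.split? s "\n\n").getD []).flatMap (tokParB cs)

-- B's single packing loop, one token at a time
def packB (cs : Int) (st : List String × List String × Int) (t : PvTok) :
    List String × List String × Int :=
  match t with
  | PvTok.hard text => (st.1 ++ [text], st.2.1, st.2.2)
  | PvTok.flush =>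
      if st.2.1 ≠ [] then (st.1 ++ [PySem.Str.join "\n\n" st.2.1], [], 0) else st
  | PvTok.merge text =>
      let st' := if st.2.1 ≠ [] ∧ st.2.2 + PySem.Str.len text + 2 > cs
                 then (st.1 ++ [PySem.Str.join "\n\n" st.2.1], ([] : List String), (0 : Int)) else st
      (st'.1, st'.2.1 ++ [text], st'.2.2 + PySem.Str.len text + (if st'.2.2 ≠ 0 then 2 else 0))

def merge_sections_alt (sections : List String) (chunk_size : Int) : List String :=
  let st := (sections.flatMap (tokSecB chunk_size)).foldl (packB chunk_size) ([], [], 0)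
  let chunks := if st.2.1 ≠ [] then st.1 ++ [PySem.Str.join "\n\n" st.2.1] else st.1
  if chunks = [] then [""] else chunks

-- ===== PRECONDITION & SPEC =====
-- Pre_ excludes exactly the inputs where A raises (ValueError): chunk_size = 0 together with
-- a section containing non-whitespace text reaches range(0, len(paragraph), 0).
def Pre_merge_sections (sections : List String) (chunk_size : Int) : Prop :=
  chunk_size ≠ 0 ∨ ∀ s ∈ sections, PySem.Str.strip s = ""
instance (sections : List String) (chunk_size : Int) : Decidable (Pre_merge_sections sections chunk_size) := by
  unfold Pre_merge_sections; infer_instance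

def pvWitness_merge_sections : List String × Int := (["hello world", "ab", "x\n\ny"], 5)

def Spec_merge_sections (sections : List String) (chunk_size : Int) (out : List String) : Prop := out = merge_sections_alt sections chunk_size
instance (sections : List String) (chunk_size : Int) (out : List String) : Decidable (Spec_merge_sections sections chunk_size out) := by unfold Spec_merge_sections; infer_instance

-- ===== CLAIM (what is proved, stated in full; the proofs are below) =====
def Claim_equal_merge_sections : Prop := ∀ (sections : List String) (chunk_size : Int), Dom_merge_sections sections chunk_size → Pre_merge_sections sections chunk_size → Spec_merge_sections sections chunk_size (merge_sections sections chunk_size)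

-- ===== LEMMAS AND PROOFS =====

theorem pvLen_nonneg (s : String) : 0 ≤ PySem.Str.len s := by
  rw [PySem.Str.len_eq]; exact Int.natCast_nonneg _

-- a run of hard tokens appends the slices to chunks and leaves (current, current_len) alone
theorem packB_hard_run (cs : Int) (f : Int → String) (r : List Int) :
    ∀ st : List String × List String × Int,
      (r.map (fun x => PvTok.hard (f x))).foldl (packB cs) st = (st.1 ++ r.map f, st.2.1, st.2.2) := by
  induction r with
  | nil => intro st; simp
  | cons x r ih => intro st; simp [packB, ih, List.append_assoc]

-- A's projected-flush if equals B's merge-flush if (the `2 if current else 0` asymmetry)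
theorem flush_if_eq (cs x : Int) (st : List String × List String × Int) :
    (if st.2.1 ≠ [] ∧ st.2.2 + x + 2 > cs
     then (st.1 ++ [PySem.Str.join "\n\n" st.2.1], ([] : List String), (0 : Int)) else st) =
    (if st.2.1 ≠ [] ∧ st.2.2 + x + (if st.2.1 ≠ [] then 2 else 0) > cs
     then (st.1 ++ [PySem.Str.join "\n\n" st.2.1], ([] : List String), (0 : Int)) else st) := by
  by_cases hcur : st.2.1 = []
  · rw [if_neg (by simp [hcur]), if_neg (by simp [hcur])]
  · rw [if_pos (show st.2.1 ≠ [] from hcur)]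

-- one paragraph's tokens, packed, equal A's paragraph body (nonblank paragraph)
theorem par_eq (cs : Int) (p : String) (st : List String × List String × Int)
    (hp : PySem.Str.strip p ≠ "") (hlen : 0 ≤ st.2.2) :
    (tokParB cs p).foldl (packB cs) st = mergeParA cs st p := by
  have hl := pvLen_nonneg p
  unfold tokParB mergeParA
  rw [if_neg hp]
  by_cases hb : PySem.Str.len p ≤ cs
  · have hb' : ¬ PySem.Str.len p > cs := by omega
    rw [if_pos hb, if_neg hb']
    simp only [List.foldl_cons, List.foldl_nil, packB]
    rw [flush_if_eq]
  · have hb' : PySem.Str.len p > cs := by omega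
    rw [if_neg hb, if_pos hb']
    simp only [List.foldl_cons]
    rw [packB_hard_run]
    rw [PySem.List.foldl_append_singleton_eq_map]
    by_cases hcur : st.2.1 = []
    · have hnf : ¬ (st.2.1 ≠ [] ∧ st.2.2 + PySem.Str.len p + (if st.2.1 ≠ [] then 2 else 0) > cs) := by
        simp [hcur]
      rw [if_neg hnf]
      have hpf : packB cs st PvTok.flush = st := by simp [packB, hcur]
      rw [hpf, if_neg (show ¬ st.2.1 ≠ [] by simp [hcur])]
    · have hf : st.2.1 ≠ [] ∧ st.2.2 + PySem.Str.len p + (if st.2.1 ≠ [] then 2 else 0) > cs := by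
        refine ⟨hcur, ?_⟩; rw [if_pos (show st.2.1 ≠ [] from hcur)]; omega
      rw [if_pos hf]
      have hpf : packB cs st PvTok.flush = (st.1 ++ [PySem.Str.join "\n\n" st.2.1], [], 0) := by
        simp [packB, hcur]
      rw [hpf, if_neg (show ¬ (([] : List String) ≠ []) by simp)]

-- A's paragraph body keeps current_len nonnegative
theorem invParA (cs : Int) (p : String) (st : List String × List String × Int)
    (h : 0 ≤ st.2.2) : 0 ≤ (mergeParA cs st p).2.2 := by
  unfold mergeParA
  have := pvLen_nonneg p
  split_ifs <;> simp_all <;> omega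

-- the paragraph loop: B's flatMapped tokens, packed, equal A's fold over the filtered paragraphs
theorem pars_eq (cs : Int) (ps : List String) :
    ∀ st : List String × List String × Int, 0 ≤ st.2.2 →
      (ps.flatMap (tokParB cs)).foldl (packB cs) st =
        (ps.filter (fun p => PySem.Str.strip p ≠ "")).foldl (mergeParA cs) st := by
  induction ps with
  | nil => intro st _; simp
  | cons p ps ih =>
      intro st h
      rw [List.flatMap_cons, List.foldl_append]
      by_cases hp : PySem.Str.strip p = ""
      · rw [List.filter_cons_of_neg (by simp [hp])]
        unfold tokParB
        rw [if_pos hp]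
        simpa using ih st h
      · rw [List.filter_cons_of_pos (by simp [hp])]
        rw [par_eq cs p st hp h, List.foldl_cons]
        exact ih _ (invParA cs p st h)

-- the paragraph fold keeps current_len nonnegative
theorem invFoldPar (cs : Int) (ps : List String) :
    ∀ st : List String × List String × Int, 0 ≤ st.2.2 →
      0 ≤ (ps.foldl (mergeParA cs) st).2.2 := by
  induction ps with
  | nil => intro st h; simpa using h
  | cons p ps ih => intro st h; exact ih _ (invParA cs p st h)

-- one section's tokens, packed, equal A's section body
theorem sec_eq (cs : Int) (s : String) (st : List String × List String × Int)
    (hlen : 0 ≤ st.2.2) :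
    (tokSecB cs s).foldl (packB cs) st = mergeSecA cs st s := by
  have hl := pvLen_nonneg s
  unfold tokSecB mergeSecA
  by_cases hb : PySem.Str.len s ≤ cs
  · have hb' : ¬ PySem.Str.len s > cs := by omega
    rw [if_pos hb, if_neg hb']
    simp only [List.foldl_cons, List.foldl_nil, packB]
    rw [flush_if_eq]
  · have hb' : PySem.Str.len s > cs := by omega
    rw [if_neg hb, if_pos hb']
    simp only [List.foldl_cons]
    by_cases hcur : st.2.1 = []
    · have hnf : ¬ (st.2.1 ≠ [] ∧ st.2.2 + PySem.Str.len s + (if st.2.1 ≠ [] then 2 else 0) > cs) := by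
        simp [hcur]
      rw [if_neg hnf]
      have hpf : packB cs st PvTok.flush = st := by simp [packB, hcur]
      rw [hpf, pars_eq cs _ st hlen]
    · have hf : st.2.1 ≠ [] ∧ st.2.2 + PySem.Str.len s + (if st.2.1 ≠ [] then 2 else 0) > cs := by
        refine ⟨hcur, ?_⟩; rw [if_pos (show st.2.1 ≠ [] from hcur)]; omega
      rw [if_pos hf]
      have hpf : packB cs st PvTok.flush = (st.1 ++ [PySem.Str.join "\n\n" st.2.1], [], 0) := by
        simp [packB, hcur]
      rw [hpf, pars_eq cs _ _ (by simp)]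

-- A's section body keeps current_len nonnegative
theorem invSecA (cs : Int) (s : String) (st : List String × List String × Int)
    (h : 0 ≤ st.2.2) : 0 ≤ (mergeSecA cs st s).2.2 := by
  unfold mergeSecA
  have hs := pvLen_nonneg s
  split_ifs
  all_goals try exact invFoldPar cs _ _ (by simp)
  all_goals try exact invFoldPar cs _ _ h
  all_goals try simp
  all_goals omega

-- the whole loop: B's token stream, packed, equals A's nested fold
theorem main_eq (cs : Int) (sections : List String) :
    ∀ st : List String × List String × Int, 0 ≤ st.2.2 →
      (sections.flatMap (tokSecB cs)).foldl (packB cs) st =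
        sections.foldl (mergeSecA cs) st := by
  induction sections with
  | nil => intro st _; simp
  | cons s ss ih =>
      intro st h
      rw [List.flatMap_cons, List.foldl_append, sec_eq cs s st h, List.foldl_cons]
      exact ih _ (invSecA cs s st h)

-- ===== VERDICT (by name: the statement is the Claim_ definition above) =====
theorem merge_sections_spec : Claim_equal_merge_sections := by
  intro sections chunk_size _ _
  unfold Spec_merge_sections merge_sections merge_sections_alt
  rw [main_eq chunk_size sections ([], [], 0) (by simp)]
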